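-- pv_equiv track=rewrite | github.com/haje01/swak | swak/util.py | parse_and_validate_cmds
-- ===== SOURCE A (Python) =====
-- def validate_tag(tag):
--     """Validate tag syntax."""
--     if type(tag) is not str:
--         raise ValueError("Tag must be a string.")
--
-- def parse_and_validate_cmds(cmds, check_input, check_tag):
--     """Parse and validate plugin commands.
--
--     Vadation rule:
--     - Starts with input plugin.
--     - Zero or more modifier plugins.
--     - Optionally finished with output plugin.
--
--     Args:
--         cmds (str): Plugin commands.
--         check_input (bool): Check for starting input.
--         check_tag (bool): Check for ending tag command.
--
--     Raises:
--         ValueError: When commands has a fault.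
--
--     Returns:
--         list: Parsed command list.
--     """
--     if type(cmds) is not str:
--         raise ValueError("Commands are not a string.")
--
--     cmds = cmds.split('|')
--     last_idx = len(cmds) - 1
--     pcmds = []
--     for i, cmd in enumerate(cmds):
--         args = [arg.strip() for arg in cmd.split()]
--         if len(args) == 0:
--             raise ValueError("Illegal plugin commands: {}".format(cmds))
--         cmd = args[0]
--         if check_input and i == 0 and not cmd.startswith('i.'):
--             raise ValueError("plugin command must starts with input "
--                              "plugin.")
--         if check_tag and i == last_idx:
--             if cmd != 'tag':
--                 raise ValueError("'sources' plugin command must ends with a "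
--                                  "tag command.")
--             tag = ' '.join(args[1:])
--             validate_tag(tag)
--         pcmds.append(args)
--     return pcmds
-- ===== SOURCE B (Python) =====
-- def validate_tag(tag):
--     """Validate tag syntax."""
--     if type(tag) is not str:
--         raise ValueError("Tag must be a string.")
--
--
-- def parse_and_validate_cmds(cmds, check_input, check_tag):
--     """Recursive version: recurse over the REVERSED segment list, so the
--     tag check happens at the top call (rightmost segment) and the input
--     check at the recursion base (leftmost segment); the parsed list is
--     assembled back-to-front on the way out."""
--     if type(cmds) is not str:
--         raise ValueError("Commands are not a string.")
--     segs = cmds.split('|')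
--
--     def go(rev, is_last):
--         args = rev[0].split()
--         if not args:
--             raise ValueError("Illegal plugin commands: {}".format(segs))
--         if check_tag and is_last:
--             if args[0] != 'tag':
--                 raise ValueError("'sources' plugin command must ends with a "
--                                  "tag command.")
--             validate_tag(' '.join(args[1:]))
--         rest = rev[1:]
--         if not rest:
--             if check_input and not args[0].startswith('i.'):
--                 raise ValueError("plugin command must starts with input "
--                                  "plugin.")
--             return [args]
--         return go(rest, False) + [args]
--
--     return go(segs[::-1], True)
-- ===== Notes on version B (the rewrite author's own statement) =====
-- stated objective: alternative
-- what changed: Replaces A's left-to-right enumerate loop with index arithmetic (i==0 / i==last checks interleaved into the tokenizing pass, plus a redundant per-token strip) by a recursion over the reversed segment list: the tag check runs at the top call, the input check at the recursion base, and the parsed list is assembled back-to-front on the way out of the recursion.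
import Mathlib
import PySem

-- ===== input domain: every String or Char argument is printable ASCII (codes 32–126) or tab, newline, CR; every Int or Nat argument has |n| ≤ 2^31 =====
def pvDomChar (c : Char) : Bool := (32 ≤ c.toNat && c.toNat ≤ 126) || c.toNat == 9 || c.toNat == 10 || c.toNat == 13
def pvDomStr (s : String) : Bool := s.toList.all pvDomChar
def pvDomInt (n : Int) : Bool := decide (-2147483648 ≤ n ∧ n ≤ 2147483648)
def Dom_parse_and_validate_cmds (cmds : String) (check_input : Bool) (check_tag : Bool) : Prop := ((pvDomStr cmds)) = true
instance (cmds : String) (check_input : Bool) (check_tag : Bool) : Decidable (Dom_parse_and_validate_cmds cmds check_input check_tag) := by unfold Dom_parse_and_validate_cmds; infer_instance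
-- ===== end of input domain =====

-- B replaces A's left-to-right enumerate loop (index arithmetic for the i==0 / i==last checks, per-token
-- strip) by a recursion over the REVERSED segment list: the tag check happens at the top call, the input
-- check at the recursion base, and the output is assembled back-to-front; objective: alternative.
-- Equivalence is about the return value; 'none' in a port encodes a Python ValueError.

-- ===== PORT A =====
-- loop body of A: for i, cmd in enumerate(cmds): … (none = raise ValueError)
def pvA_go (check_input check_tag : Bool) (last_idx : Int) :
    List (Int × String) → List (List String) → Option (List (List String))
  | [], pcmds => some pcmds
  | (i, cmd) :: rest, pcmds =>
    let args := (PySem.Str.split₀ cmd).map PySem.Str.strip   -- [arg.strip() for arg in cmd.split()]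
    match args with
    | [] => none                                             -- len(args) == 0: raise
    | c :: _ =>                                              -- cmd = args[0]
      if check_input && i == 0 && !(PySem.Str.startswith c "i.") then none
      else if check_tag && i == last_idx then
        if c ≠ "tag" then none
        else
          -- tag = ' '.join(args[1:]); validate_tag(tag) never raises (tag is a str); args[1:] = drop 1 (start ≥ 0)
          let _tag := PySem.Str.join " " (args.drop 1)
          pvA_go check_input check_tag last_idx rest (pcmds ++ [args])
      else pvA_go check_input check_tag last_idx rest (pcmds ++ [args])

def pvA_opt (cmds : String) (check_input check_tag : Bool) : Option (List (List String)) :=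
  let cmdsL := (PySem.Str.split? cmds "|").getD []           -- cmds = cmds.split('|'); total since '|' ≠ ''
  let last_idx : Int := (cmdsL.length : Int) - 1
  pvA_go check_input check_tag last_idx (PySem.List.enumerate cmdsL 0) []

def parse_and_validate_cmds (cmds : String) (check_input : Bool) (check_tag : Bool) : List (List String) :=
  (pvA_opt cmds check_input check_tag).getD []

-- ===== PORT B =====
-- Source B's inner 'go(rev, is_last)': recursion over the reversed segment list (none = raise ValueError);
-- go is only ever called with rev nonempty (split('|') never returns []), so [] is an unreachable stub
def pvB_go (ci ct : Bool) : List String → Bool → Option (List (List String))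
  | [], _ => none
  | head :: rest, is_last =>
    let args := PySem.Str.split₀ head                        -- args = rev[0].split()
    if args.isEmpty then none                                -- not args: raise
    else if ct && is_last && !(args.headD "" == "tag") then none   -- check_tag and is_last: args[0] != 'tag'
    else
      -- inside the tag branch: validate_tag(' '.join(args[1:])) never raises (tag is a str)
      let _tag := PySem.Str.join " " (args.drop 1)
      match rest with                                        -- rest = rev[1:]
      | [] =>                                                -- not rest: recursion base = leftmost segment
        if ci && !(PySem.Str.startswith (args.headD "") "i.") then none
        else some [args]
      | r :: rs => (pvB_go ci ct (r :: rs) false).map (· ++ [args])   -- go(rest, False) + [args]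

def pvB_opt (cmds : String) (check_input check_tag : Bool) : Option (List (List String)) :=
  let segs := (PySem.Str.split? cmds "|").getD []            -- segs = cmds.split('|')
  pvB_go check_input check_tag segs.reverse true             -- go(segs[::-1], True)

def parse_and_validate_cmds_alt (cmds : String) (check_input : Bool) (check_tag : Bool) : List (List String) :=
  (pvB_opt cmds check_input check_tag).getD []

-- ===== PRECONDITION & SPEC =====
-- Pre_ excludes exactly the inputs on which A raises ValueError: some '|'-separated command has no
-- tokens, or check_input finds a first token not starting with 'i.', or check_tag finds a last
-- command whose first token is not 'tag'.
def Pre_parse_and_validate_cmds (cmds : String) (check_input : Bool) (check_tag : Bool) : Prop :=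
  let toks := ((PySem.Str.split? cmds "|").getD []).map PySem.Str.split₀
  (∀ t ∈ toks, t ≠ []) ∧
  (check_input = true → PySem.Str.startswith ((toks.headD []).headD "") "i." = true) ∧
  (check_tag = true → (toks.getLastD []).headD "" = "tag")
instance (cmds : String) (check_input : Bool) (check_tag : Bool) : Decidable (Pre_parse_and_validate_cmds cmds check_input check_tag) := by unfold Pre_parse_and_validate_cmds; infer_instance

def pvWitness_parse_and_validate_cmds : String × Bool × Bool := ("i.stdin | mod x | tag a b", true, true)

def Spec_parse_and_validate_cmds (cmds : String) (check_input : Bool) (check_tag : Bool) (out : List (List String)) : Prop := out = parse_and_validate_cmds_alt cmds check_input check_tag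
instance (cmds : String) (check_input : Bool) (check_tag : Bool) (out : List (List String)) : Decidable (Spec_parse_and_validate_cmds cmds check_input check_tag out) := by unfold Spec_parse_and_validate_cmds; infer_instance

-- ===== CLAIM (what is proved, stated in full; the proofs are below) =====
def Claim_equal_parse_and_validate_cmds : Prop := ∀ (cmds : String) (check_input : Bool) (check_tag : Bool), Dom_parse_and_validate_cmds cmds check_input check_tag → Pre_parse_and_validate_cmds cmds check_input check_tag → Spec_parse_and_validate_cmds cmds check_input check_tag (parse_and_validate_cmds cmds check_input check_tag)

-- ===== LEMMAS AND PROOFS =====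

-- every token produced by Python's whitespace split is nonempty and whitespace-free
theorem pv_split₀_go_tokens : ∀ (s cur : List Char) (acc : List (List Char)),
    (∀ c ∈ cur, PySem.Chars.isspace c = false) →
    (∀ t ∈ acc, t ≠ [] ∧ ∀ c ∈ t, PySem.Chars.isspace c = false) →
    ∀ t ∈ PySem.Chars.split₀.go s cur acc, t ≠ [] ∧ ∀ c ∈ t, PySem.Chars.isspace c = false := by
  intro s
  induction s with
  | nil =>
    intro cur acc hcur hacc t ht
    simp only [PySem.Chars.split₀.go] at ht
    split at ht
    · exact hacc t (List.mem_reverse.mp ht)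
    · rcases List.mem_cons.mp (List.mem_reverse.mp ht) with h | h
      · next hne =>
        subst h
        constructor
        · simpa using fun h => hne (by simp [h])
        · intro c hc; exact hcur c (List.mem_reverse.mp hc)
      · exact hacc t h
  | cons c rest ih =>
    intro cur acc hcur hacc t ht
    simp only [PySem.Chars.split₀.go] at ht
    split at ht
    · split at ht
      · exact ih [] acc (by simp) hacc t ht
      · refine ih [] _ (by simp) ?_ t ht
        intro u hu
        rcases List.mem_cons.mp hu with h | h
        · subst h
          next hsp hne =>
          constructor
          · simpa using fun h => hne (by simp [h])
          · intro x hx; exact hcur x (List.mem_reverse.mp hx)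
        · exact hacc u h
    · next hsp =>
      refine ih (c :: cur) acc ?_ hacc t ht
      intro x hx
      rcases List.mem_cons.mp hx with h | h
      · simpa [h] using hsp
      · exact hcur x h

theorem pv_split₀_tokens (s : List Char) :
    ∀ t ∈ PySem.Chars.split₀ s, t ≠ [] ∧ ∀ c ∈ t, PySem.Chars.isspace c = false := by
  intro t ht
  exact pv_split₀_go_tokens s [] [] (by simp) (by simp) t ht

theorem pv_strip_id (t : List Char) (h : ∀ c ∈ t, PySem.Chars.isspace c = false) :
    PySem.Chars.strip t = t := by
  have h1 : PySem.Chars.lstrip t = t := by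
    unfold PySem.Chars.lstrip
    cases t with
    | nil => simp
    | cons c r => simp [List.dropWhile, h c (by simp)]
  unfold PySem.Chars.strip
  rw [h1]
  unfold PySem.Chars.rstrip
  have : ∀ c ∈ t.reverse, PySem.Chars.isspace c = false := fun c hc => h c (List.mem_reverse.mp hc)
  cases ht : t.reverse with
  | nil => simp_all
  | cons c r =>
    have := this c (by rw [ht]; simp)
    simp [List.dropWhile, this, ← ht]

-- hence A's per-token strip is the identity on split₀'s tokens
theorem pv_map_strip_split₀ (cmd : String) :
    (PySem.Str.split₀ cmd).map PySem.Str.strip = PySem.Str.split₀ cmd := by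
  conv_rhs => rw [show PySem.Str.split₀ cmd = (PySem.Str.split₀ cmd).map id from (List.map_id _).symm]
  apply List.map_congr_left
  intro t ht
  rw [PySem.Str.split₀] at ht
  rcases List.mem_map.mp ht with ⟨l, hl, rfl⟩
  have := pv_split₀_tokens cmd.toList l hl
  rw [PySem.Str.strip]
  congr 1
  rw [show (String.ofList l).toList = l by simp]
  exact pv_strip_id l this.2

-- A's loop returns the accumulated token lists when no check fires
theorem pvA_go_spec (ci ct : Bool) (li : Int) :
    ∀ (l : List (Int × String)) (acc : List (List String)),
    (∀ p ∈ l, PySem.Str.split₀ p.2 ≠ [] ∧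
       (ci = true → p.1 = 0 → PySem.Str.startswith (((PySem.Str.split₀ p.2).headD "")) "i." = true) ∧
       (ct = true → p.1 = li → ((PySem.Str.split₀ p.2).headD "") = "tag")) →
    pvA_go ci ct li l acc = some (acc ++ l.map (fun p => PySem.Str.split₀ p.2)) := by
  intro l
  induction l with
  | nil => intro acc _; simp [pvA_go]
  | cons p rest ih =>
    obtain ⟨i, cmd⟩ := p
    intro acc h
    obtain ⟨hne, hin, htag⟩ := h (i, cmd) (by simp)
    simp only [pvA_go, pv_map_strip_split₀]
    cases hs : PySem.Str.split₀ cmd with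
    | nil => exact absurd hs hne
    | cons c tl =>
      have hrec := ih (acc ++ [c :: tl]) (fun q hq => h q (by simp [hq]))
      have hguard1 : (ci && i == 0 && !(PySem.Str.startswith c "i.")) = false := by
        cases ci with
        | false => simp
        | true =>
          by_cases hi : i = 0
          · have := hin rfl hi
            simp [hs] at this
            simp [this]
          · simp [hi]
      simp only [hguard1, Bool.false_eq_true, if_false]
      by_cases hil : ct = true ∧ i = li
      · have hct : (ct && i == li) = true := by simp [hil.1, hil.2]
        have hc : c = "tag" := by have := htag hil.1 hil.2; simpa [hs] using this
        simp only [hct, if_true]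
        rw [if_neg (by simp [hc])]
        rw [hrec]
        simp [hs, hc]
      · have hct : (ct && i == li) = false := by
          by_cases h' : ct = true
          · simp only [h', Bool.true_and, beq_eq_false_iff_ne]
            exact fun he => hil ⟨h', he⟩
          · simp [Bool.eq_false_iff.mpr h']
        simp only [hct, Bool.false_eq_true, if_false]
        rw [hrec]
        simp [hs]

-- B's recursion returns the token lists of the reversed input, in forward order, when no check fires
theorem pvB_go_spec (ci ct : Bool) :
    ∀ (rev : List String) (is_last : Bool), rev ≠ [] →
    (∀ s ∈ rev, PySem.Str.split₀ s ≠ []) →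
    (ct = true → is_last = true → (PySem.Str.split₀ (rev.headD "")).headD "" = "tag") →
    (ci = true → PySem.Str.startswith ((PySem.Str.split₀ (rev.getLastD "")).headD "") "i." = true) →
    pvB_go ci ct rev is_last = some (rev.reverse.map PySem.Str.split₀) := by
  intro rev
  induction rev with
  | nil => intro _ h; exact absurd rfl h
  | cons head rest ih =>
    intro is_last _ hne htag hin
    have hhead : PySem.Str.split₀ head ≠ [] := hne head (by simp)
    have hguard2 : (ct && is_last && !((PySem.Str.split₀ head).headD "" == "tag")) = false := by
      by_cases h : ct = true ∧ is_last = true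
      · have := htag h.1 h.2; simp_all
      · rcases Decidable.not_and_iff_not_or_not.mp h with h' | h' <;>
          simp [Bool.eq_false_iff.mpr h']
    rw [pvB_go.eq_def]
    simp only [List.isEmpty_iff, hhead, if_false, hguard2, Bool.false_eq_true]
    cases rest with
    | nil =>
      by_cases hci : ci = true
      · have := hin hci; simp_all
      · simp_all
    | cons r rs =>
      have hrec := ih false (by simp) (fun s hs => hne s (List.mem_cons_of_mem _ hs))
        (by simp) (by simpa using hin)
      simp [hrec]

theorem pv_main (cmds : String) (ci ct : Bool)
    (hpre : Pre_parse_and_validate_cmds cmds ci ct) :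
    parse_and_validate_cmds cmds ci ct = parse_and_validate_cmds_alt cmds ci ct := by
  obtain ⟨h1, h2, h3⟩ := hpre
  unfold parse_and_validate_cmds parse_and_validate_cmds_alt pvA_opt pvB_opt
  cases hps : (PySem.Str.split? cmds "|").getD [] with
  | nil =>
    cases ci <;> cases ct <;> simp [pvA_go, pvB_go.eq_def, PySem.List.enumerate]
  | cons a r =>
    rw [hps] at h1 h2 h3
    set ps := a :: r with hdefps
    have hpsne : ps ≠ [] := by simp [hdefps]
    have hne : ∀ cmd ∈ ps, PySem.Str.split₀ cmd ≠ [] :=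
      fun cmd hc => h1 _ (List.mem_map_of_mem hc)
    set toks := ps.map PySem.Str.split₀ with hdeftoks
    -- A side
    have hmap : (PySem.List.enumerate ps 0).map (fun p => PySem.Str.split₀ p.2)
        = toks := by
      calc (PySem.List.enumerate ps 0).map (fun p => PySem.Str.split₀ p.2)
          = ((PySem.List.enumerate ps 0).map (fun x => x.2)).map PySem.Str.split₀ := by
            rw [List.map_map]; rfl
        _ = toks := by rw [PySem.List.map_snd_enumerate]
    have hA : pvA_go ci ct ((ps.length : Int) - 1) (PySem.List.enumerate ps 0) []
        = some toks := by
      rw [pvA_go_spec]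
      · rw [List.nil_append, hmap]
      · intro p hp
        rcases (PySem.List.mem_enumerate_iff ps 0 p).mp hp with ⟨k, hk, rfl⟩
        refine ⟨h1 _ (List.mem_map_of_mem (ps.getElem_mem hk)), ?_, ?_⟩
        · intro hci h0
          have hk0 : k = 0 := by simpa using h0
          subst hk0
          simpa using h2 hci
        · intro hct hlast
          have hkl : k = ps.length - 1 := by
            have : (k : Int) = (ps.length : Int) - 1 := by simpa using hlast
            omega
          subst hkl
          have := h3 hct
          rw [List.getLastD_eq_getLast?, hdeftoks, List.getLast?_eq_getElem?] at this
          simp only [List.length_map] at this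
          rw [List.getElem?_eq_getElem (by simp [hdefps])] at this
          simpa using this
    -- B side
    have hB : pvB_go ci ct ps.reverse true = some toks := by
      rw [pvB_go_spec ci ct ps.reverse true (by simp [hpsne])
            (fun s hs => hne s (List.mem_reverse.mp hs))
            ?_ ?_]
      · simp [hdeftoks]
      · intro hct _
        have h3' := h3 hct
        obtain ⟨x, xs, hx⟩ : ∃ x xs, ps.reverse = x :: xs := by
          cases hr : ps.reverse with
          | nil => exact absurd hr (by simp [hdefps])
          | cons x xs => exact ⟨x, xs, rfl⟩
        have hlast : ps.getLast? = some x := by rw [← List.head?_reverse, hx]; rfl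
        rw [List.getLastD_eq_getLast?, hdeftoks, List.getLast?_map, hlast] at h3'
        rw [hx]
        simpa using h3'
      · intro hci
        have h2' := h2 hci
        rw [List.getLastD_eq_getLast?, List.getLast?_reverse, hdefps]
        simpa [hdeftoks, hdefps] using h2'
    rw [hA, hB]

-- ===== VERDICT (by name: the statement is the Claim_ definition above) =====
theorem parse_and_validate_cmds_spec : Claim_equal_parse_and_validate_cmds := by
  intro cmds check_input check_tag _hdom hpre
  exact pv_main cmds check_input check_tag hpre
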